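-- pv_equiv track=rewrite | github.com/mjapkim/EN601647_final_scan_contaminants | bloom_filter/genome_preproc.py | circular_read
-- ===== SOURCE A (Python) =====
-- def circular_read(a, k, ind):
--     # function to make sure the reads wrap around
--     i = ind
--     n = len(a)
--     read = ""
--     while i < k + ind: # when we have gone + k chars forward
--         read = read + a[(i % n)]
--         i += 1
--     return read
-- ===== SOURCE B (Python) =====
-- def circular_read(a, k, ind):
--     if k <= 0:
--         return ""
--     n = len(a)
--     start = ind % n  # raises ZeroDivisionError when a is empty, like A
--     m = (start + k) // n + 1
--     return (a * m)[start:start + k]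
-- ===== Notes on version B (the rewrite author's own statement) =====
-- stated objective: faster
-- what changed: Replaced the character-by-character modular while-loop (with repeated string concatenation) by a closed-form repeat-and-slice: start = ind % n, repeat the string (start+k)//n + 1 times and slice [start:start+k].
import Mathlib
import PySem

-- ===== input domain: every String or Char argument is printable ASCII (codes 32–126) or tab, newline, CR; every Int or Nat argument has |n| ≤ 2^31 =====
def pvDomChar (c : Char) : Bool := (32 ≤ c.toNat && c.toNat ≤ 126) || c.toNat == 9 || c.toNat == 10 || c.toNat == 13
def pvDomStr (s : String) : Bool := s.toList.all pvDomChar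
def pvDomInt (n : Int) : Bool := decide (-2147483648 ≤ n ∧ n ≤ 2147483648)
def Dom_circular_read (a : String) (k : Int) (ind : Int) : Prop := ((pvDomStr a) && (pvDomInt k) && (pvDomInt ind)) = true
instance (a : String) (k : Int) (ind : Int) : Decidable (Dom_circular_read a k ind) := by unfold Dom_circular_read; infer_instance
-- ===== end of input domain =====

-- B replaces A's character-by-character modular loop (quadratic via repeated concatenation) with a closed-form repeat-and-slice (measured faster).
-- A raises ZeroDivisionError when len(a) == 0 and k > 0 (so does B); those inputs are outside Pre_.


-- ===== PORT A =====
-- while i < stop: read = read + a[i % n]; i += 1   (pyGet? = none, i.e. n = 0, is the raising case, outside Pre_)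
def crLoop (cs : List Char) (n : Int) (stop : Int) (i : Int) (read : List Char) : List Char :=
  if _h : i < stop then
    match PySem.List.pyGet? cs (PySem.Int.mod i n) with
    | some c => crLoop cs n stop (i + 1) (read ++ [c])
    | none => read
  else read
termination_by (stop - i).toNat
decreasing_by omega

def circular_read (a : String) (k : Int) (ind : Int) : String :=
  String.ofList (crLoop a.toList (PySem.Str.len a) (k + ind) ind [])

-- ===== PORT B =====
def circular_read_alt (a : String) (k : Int) (ind : Int) : String :=
  if k ≤ 0 then "" else
    let cs := a.toList
    let n : Int := PySem.Str.len a
    let start := PySem.Int.mod ind n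
    let m := PySem.Int.floordiv (start + k) n + 1
    String.ofList (PySem.List.slice (PySem.List.pyRepeat cs m) (some start) (some (start + k)))

-- ===== PRECONDITION & SPEC =====
-- Pre_ excludes exactly the inputs where A raises ZeroDivisionError: empty string with k > 0.
def Pre_circular_read (a : String) (k : Int) (ind : Int) : Prop := a.toList ≠ [] ∨ k ≤ 0
instance (a : String) (k : Int) (ind : Int) : Decidable (Pre_circular_read a k ind) := by unfold Pre_circular_read; infer_instance

def pvWitness_circular_read : String × Int × Int := ("acgt", 6, -3)

def Spec_circular_read (a : String) (k : Int) (ind : Int) (out : String) : Prop := out = circular_read_alt a k ind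
instance (a : String) (k : Int) (ind : Int) (out : String) : Decidable (Spec_circular_read a k ind out) := by unfold Spec_circular_read; infer_instance

-- ===== CLAIM (what is proved, stated in full; the proofs are below) =====
def Claim_equal_circular_read : Prop := ∀ (a : String) (k : Int) (ind : Int), Dom_circular_read a k ind → Pre_circular_read a k ind → Spec_circular_read a k ind (circular_read a k ind)

-- ===== LEMMAS AND PROOFS =====

-- A's loop appends, left to right, the characters a[(i+j) % n] for j = 0 .. t-1.
theorem crLoop_eq (cs : List Char) (hcs : cs ≠ []) (t : Nat) (i : Int) (read : List Char) :
    crLoop cs (cs.length : Int) (i + t) i read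
      = read ++ (List.range t).map
          (fun (j : Nat) => PySem.List.pyGetD cs (PySem.Int.mod (i + (j : Int)) (cs.length : Int)) 'A') := by
  induction t generalizing i read with
  | zero => rw [crLoop]; simp
  | succ t ih =>
    have hn : (0:Int) < (cs.length : Int) := by
      have := List.length_pos_iff.mpr hcs; exact_mod_cast this
    have h0 : (0:Int) ≤ PySem.Int.mod i (cs.length : Int) := PySem.Int.mod_nonneg _ hn
    have hlt : PySem.Int.mod i (cs.length : Int) < (cs.length : Int) := PySem.Int.mod_lt _ hn
    rw [crLoop]
    have hi : i < i + ((t + 1 : Nat) : Int) := by push_cast; omega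
    rw [dif_pos hi, PySem.List.pyGet?_eq_some_getElem _ h0 (by exact_mod_cast hlt)]
    dsimp only
    have harg : i + ((t + 1 : Nat) : Int) = (i + 1) + (t : Nat) := by push_cast; ring
    rw [harg, ih (i + 1)]
    rw [List.range_succ_eq_map, List.map_cons, List.map_map]
    simp only [List.append_assoc, List.cons_append, List.nil_append, Nat.cast_zero, add_zero]
    congr 1
    congr 1
    · exact (PySem.List.pyGetD_eq_getElem _ 'A' h0 (by exact_mod_cast hlt)).symm
    · apply List.map_congr_left
      intro j _
      simp only [Function.comp]
      congr 2
      push_cast [Nat.succ_eq_add_one]; ring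

theorem flatten_replicate_length {α : Type} (xs : List α) (q : Nat) :
    ((List.replicate q xs).flatten).length = q * xs.length := by
  induction q with
  | zero => simp
  | succ q ih =>
    rw [List.replicate_succ, List.flatten_cons, List.length_append, ih]
    ring

-- indexing into xs repeated q times wraps modulo xs.length
theorem getElem?_flatten_replicate {α : Type} (xs : List α) (q : Nat) (i : Nat)
    (h : i < q * xs.length) :
    ((List.replicate q xs).flatten)[i]? = xs[i % xs.length]? := by
  induction q generalizing i with
  | zero => rw [Nat.zero_mul] at h; omega
  | succ q ih =>
    rw [List.replicate_succ, List.flatten_cons]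
    rcases Nat.lt_or_ge i xs.length with hlt | hge
    · rw [List.getElem?_append_left hlt, Nat.mod_eq_of_lt hlt]
    · have hpos : 0 < xs.length := by
        rcases Nat.eq_zero_or_pos xs.length with h0 | h0
        · rw [h0, Nat.mul_zero] at h; omega
        · exact h0
      rw [List.getElem?_append_right hge, ih (i - xs.length) (by
        have hexp : (q + 1) * xs.length = q * xs.length + xs.length := by ring
        omega)]
      have hmodshift : (i - xs.length) % xs.length = i % xs.length := by
        conv_rhs => rw [← Nat.sub_add_cancel hge]
        rw [Nat.add_mod_right]
      rw [hmodshift]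

-- ===== VERDICT (by name: the statement is the Claim_ definition above) =====
theorem circular_read_spec : Claim_equal_circular_read := by
  intro a k ind _hdom hpre
  unfold Spec_circular_read circular_read circular_read_alt
  by_cases hk : k ≤ 0
  · rw [if_pos hk, crLoop]
    have : ¬ ind < k + ind := by omega
    rw [dif_neg this]
  · rw [if_neg hk]
    have hcs : a.toList ≠ [] := by
      rcases hpre with h | h
      · exact h
      · omega
    set cs := a.toList with hcsdef
    have hnN : 0 < cs.length := List.length_pos_iff.mpr hcs
    have hn : (0:Int) < (cs.length : Int) := by exact_mod_cast hnN
    have hlen : PySem.Str.len a = (cs.length : Int) := by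
      simp [PySem.Str.len_eq, hcsdef]
    rw [hlen]
    dsimp only
    -- A side: loop runs k.toNat times from i = ind
    have hstop : k + ind = ind + ((k.toNat : Nat) : Int) := by omega
    rw [hstop, crLoop_eq cs hcs k.toNat ind []]
    -- B side abbreviations
    set start := PySem.Int.mod ind (cs.length : Int) with hstart
    have hs0 : (0:Int) ≤ start := PySem.Int.mod_nonneg _ hn
    have hslt : start < (cs.length : Int) := PySem.Int.mod_lt _ hn
    set m := PySem.Int.floordiv (start + k) (cs.length : Int) + 1 with hm
    have hcover : start + k ≤ (cs.length : Int) * m := by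
      have h1 := PySem.Int.floordiv_mul_add_mod (start + k) (cs.length : Int)
      have h2 := PySem.Int.mod_nonneg (start + k) hn
      have h3 := PySem.Int.mod_lt (start + k) hn
      rw [hm]; nlinarith
    have hm0 : (0:Int) ≤ m := by
      have h1 := PySem.Int.floordiv_mul_add_mod (start + k) (cs.length : Int)
      have h3 := PySem.Int.mod_lt (start + k) hn
      rw [hm]; nlinarith
    -- lengths in Nat
    have hreplen : (PySem.List.pyRepeat cs m).length = m.toNat * cs.length := by
      simp only [PySem.List.pyRepeat]
      exact flatten_replicate_length cs m.toNat
    have hcoverN : start.toNat + k.toNat ≤ m.toNat * cs.length := by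
      have : ((m.toNat * cs.length : Nat) : Int) = (cs.length : Int) * m := by
        push_cast [Int.toNat_of_nonneg hm0]; ring
      omega
    rw [PySem.List.slice_toNat _ hs0 (by omega)]
    have hkk : (start + k).toNat - start.toNat = k.toNat := by omega
    rw [hkk]
    rw [List.nil_append]
    congr 1
    apply List.ext_getElem?
    intro j
    rcases Nat.lt_or_ge j k.toNat with hj | hj
    · -- in range on both sides
      rw [List.getElem?_map, List.getElem?_range hj]
      simp only [Option.map_some]
      rw [List.getElem?_take, if_pos hj, List.getElem?_drop]
      simp only [PySem.List.pyRepeat]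
      rw [getElem?_flatten_replicate cs m.toNat (start.toNat + j) (by omega)]
      -- identify the two indices
      have hmodeq : PySem.Int.mod (ind + (j : Int)) (cs.length : Int)
          = (((start.toNat + j) % cs.length : Nat) : Int) := by
        rw [PySem.Int.mod_eq_emod_of_pos hn]
        have hstart' : start = ind % (cs.length : Int) := by
          rw [hstart, PySem.Int.mod_eq_emod_of_pos hn]
        have hsplit : ind + (j : Int)
            = (ind % (cs.length : Int) + (j : Int)) + (cs.length : Int) * (ind / (cs.length : Int)) := by
          have := Int.emod_add_mul_ediv ind (cs.length : Int); linarith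
        have hsnat : ((start.toNat : Nat) : Int) = start := Int.toNat_of_nonneg hs0
        rw [hsplit, Int.add_mul_emod_self_left, ← hstart']
        rw [show start + (j : Int) = ((start.toNat + j : Nat) : Int) by push_cast [hsnat]; ring]
        exact (Int.natCast_mod _ _).symm
      rw [hmodeq]
      have hmlt : (start.toNat + j) % cs.length < cs.length := Nat.mod_lt _ hnN
      rw [PySem.List.pyGetD_eq_getElem cs 'A' (by positivity) (by exact_mod_cast hmlt)]
      rw [List.getElem?_eq_getElem hmlt]
      congr 1
    · -- out of range on both sides
      rw [List.getElem?_map, show (List.range k.toNat)[j]? = none by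
        rw [List.getElem?_eq_none_iff]; simpa using hj]
      rw [List.getElem?_take, if_neg (by omega)]
      simp
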